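-- pv_equiv track=rewrite | github.com/online-ml/chantilly | chantilly/api.py | humanize_ns
-- ===== SOURCE A (Python) =====
-- def humanize_ns(ns: int) -> str:
--
--     if ns == 0:
--         return '0ns'
--
--     μs = ('μs', 1000)
--     ms = ('ms', μs[1] * 1000)
--     s  = ('s',  ms[1] * 1000)
--     m  = ('m',   s[1] * 60)
--
--     rep = ''
--
--     for d in (m, s, ms, μs):
--         k, ns = divmod(ns, d[1])
--         if k:
--             rep += f'{k}{d[0]}'
--
--     if ns:
--         rep += f'{ns}ns'
--
--     return rep
-- ===== SOURCE B (Python) =====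
-- def humanize_ns(ns: int) -> str:
--     if ns == 0:
--         return '0ns'
--
--     def go(n, units):
--         # recurse smallest unit first, building the string back-to-front:
--         # the remainder at this unit is appended after the larger units' text
--         if not units:
--             return f'{n}m' if n else ''
--         suffix, base = units[0]
--         q, r = divmod(n, base)
--         return go(q, units[1:]) + (f'{r}{suffix}' if r else '')
--
--     return go(ns, [('ns', 1000), ('μs', 1000), ('ms', 1000), ('s', 60)])
-- ===== Notes on version B (the rewrite author's own statement) =====
-- stated objective: alternative
-- what changed: Replaces A's iterative largest-first loop over absolute divisors (printing quotients of a running remainder) with a recursive smallest-first chain of relative bases (1000,1000,1000,60) that prints each level's remainder and builds the string back-to-front on return from the recursion.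
import Mathlib
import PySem

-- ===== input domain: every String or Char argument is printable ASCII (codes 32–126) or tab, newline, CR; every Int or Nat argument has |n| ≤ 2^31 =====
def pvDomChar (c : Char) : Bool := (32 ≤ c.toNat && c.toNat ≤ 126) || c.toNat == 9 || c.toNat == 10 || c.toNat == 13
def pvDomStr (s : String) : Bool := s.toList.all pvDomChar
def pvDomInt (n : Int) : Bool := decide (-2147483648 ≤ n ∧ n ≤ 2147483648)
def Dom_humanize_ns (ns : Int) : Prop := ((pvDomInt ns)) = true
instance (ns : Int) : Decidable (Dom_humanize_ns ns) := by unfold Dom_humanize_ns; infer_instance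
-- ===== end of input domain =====

-- B replaces A's largest-first loop over absolute divisors (printing quotients of a
-- running remainder) by a smallest-first recursion over relative bases that prints
-- remainders and builds the string back-to-front (objective: alternative).

-- ===== PORT A =====
-- Python's divmod(ns, d) with a positive literal divisor is (floordiv ns d, mod ns d); exact here.
def humanize_ns (ns : Int) : String :=
  if ns = 0 then "0ns" else
    let μs : String × Int := ("μs", 1000)
    let ms : String × Int := ("ms", μs.2 * 1000)
    let s  : String × Int := ("s",  ms.2 * 1000)
    let m  : String × Int := ("m",  s.2 * 60)
    let st := [m, s, ms, μs].foldl
      (fun (st : Int × String) (d : String × Int) =>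
        let k := PySem.Int.floordiv st.1 d.2
        let r := PySem.Int.mod st.1 d.2
        (r, if k ≠ 0 then st.2 ++ PySem.Int.toStr k ++ d.1 else st.2))
      (ns, "")
    if st.1 ≠ 0 then st.2 ++ PySem.Int.toStr st.1 ++ "ns" else st.2

-- ===== PORT B =====
-- recursive helper 'go' of Source B: smallest unit first, string built on return
def hn_go (n : Int) : List (String × Int) → String
  | [] => if n ≠ 0 then PySem.Int.toStr n ++ "m" else ""
  | (suffix, base) :: rest =>
      let q := PySem.Int.floordiv n base
      let r := PySem.Int.mod n base
      hn_go q rest ++ (if r ≠ 0 then PySem.Int.toStr r ++ suffix else "")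

def humanize_ns_alt (ns : Int) : String :=
  if ns = 0 then "0ns" else
    hn_go ns [("ns", 1000), ("μs", 1000), ("ms", 1000), ("s", 60)]

-- ===== PRECONDITION & SPEC =====
def Spec_humanize_ns (ns : Int) (out : String) : Prop := out = humanize_ns_alt ns
instance (ns : Int) (out : String) : Decidable (Spec_humanize_ns ns out) := by unfold Spec_humanize_ns; infer_instance

-- ===== CLAIM (what is proved, stated in full; the proofs are below) =====
def Claim_equal_humanize_ns : Prop := ∀ (ns : Int), Dom_humanize_ns ns → Spec_humanize_ns ns (humanize_ns ns)

-- ===== LEMMAS AND PROOFS =====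

-- B's nested relative quotients/remainders equal A's absolute-divisor chain values
theorem pv_min (ns : Int) :
    PySem.Int.floordiv (PySem.Int.floordiv (PySem.Int.floordiv (PySem.Int.floordiv ns 1000) 1000) 1000) 60
      = PySem.Int.floordiv ns 60000000000 := by
  simp only [PySem.Int.floordiv_eq_ediv_of_pos (by norm_num : (0:Int) < 1000),
    PySem.Int.floordiv_eq_ediv_of_pos (by norm_num : (0:Int) < 60),
    PySem.Int.floordiv_eq_ediv_of_pos (by norm_num : (0:Int) < 60000000000)]
  omega

theorem pv_sec (ns : Int) :
    PySem.Int.mod (PySem.Int.floordiv (PySem.Int.floordiv (PySem.Int.floordiv ns 1000) 1000) 1000) 60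
      = PySem.Int.floordiv (PySem.Int.mod ns 60000000000) 1000000000 := by
  simp only [PySem.Int.floordiv_eq_ediv_of_pos (by norm_num : (0:Int) < 1000),
    PySem.Int.floordiv_eq_ediv_of_pos (by norm_num : (0:Int) < 1000000000),
    PySem.Int.mod_eq_emod_of_pos (by norm_num : (0:Int) < 60),
    PySem.Int.mod_eq_emod_of_pos (by norm_num : (0:Int) < 60000000000)]
  omega

theorem pv_ms (ns : Int) :
    PySem.Int.mod (PySem.Int.floordiv (PySem.Int.floordiv ns 1000) 1000) 1000
      = PySem.Int.floordiv (PySem.Int.mod (PySem.Int.mod ns 60000000000) 1000000000) 1000000 := by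
  simp only [PySem.Int.floordiv_eq_ediv_of_pos (by norm_num : (0:Int) < 1000),
    PySem.Int.floordiv_eq_ediv_of_pos (by norm_num : (0:Int) < 1000000),
    PySem.Int.mod_eq_emod_of_pos (by norm_num : (0:Int) < 1000),
    PySem.Int.mod_eq_emod_of_pos (by norm_num : (0:Int) < 1000000000),
    PySem.Int.mod_eq_emod_of_pos (by norm_num : (0:Int) < 60000000000)]
  omega

theorem pv_us (ns : Int) :
    PySem.Int.mod (PySem.Int.floordiv ns 1000) 1000
      = PySem.Int.floordiv (PySem.Int.mod (PySem.Int.mod (PySem.Int.mod ns 60000000000) 1000000000) 1000000) 1000 := by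
  simp only [PySem.Int.floordiv_eq_ediv_of_pos (by norm_num : (0:Int) < 1000),
    PySem.Int.mod_eq_emod_of_pos (by norm_num : (0:Int) < 1000),
    PySem.Int.mod_eq_emod_of_pos (by norm_num : (0:Int) < 1000000),
    PySem.Int.mod_eq_emod_of_pos (by norm_num : (0:Int) < 1000000000),
    PySem.Int.mod_eq_emod_of_pos (by norm_num : (0:Int) < 60000000000)]
  omega

theorem pv_rem (ns : Int) :
    PySem.Int.mod ns 1000
      = PySem.Int.mod (PySem.Int.mod (PySem.Int.mod (PySem.Int.mod ns 60000000000) 1000000000) 1000000) 1000 := by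
  simp only [PySem.Int.mod_eq_emod_of_pos (by norm_num : (0:Int) < 1000),
    PySem.Int.mod_eq_emod_of_pos (by norm_num : (0:Int) < 1000000),
    PySem.Int.mod_eq_emod_of_pos (by norm_num : (0:Int) < 1000000000),
    PySem.Int.mod_eq_emod_of_pos (by norm_num : (0:Int) < 60000000000)]
  omega

-- ===== VERDICT (by name: the statement is the Claim_ definition above) =====
theorem humanize_ns_spec : Claim_equal_humanize_ns := by
  intro ns _
  unfold Spec_humanize_ns humanize_ns humanize_ns_alt
  by_cases h : ns = 0
  · simp [h]
  · simp only [h, if_false, List.foldl, hn_go]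
    norm_num only
    rw [pv_min ns, pv_sec ns, pv_ms ns, pv_us ns, pv_rem ns]
    split_ifs <;> simp [String.append_assoc]
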